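-- pv_equiv track=rewrite | github.com/qqpigass/FREEPII | code/Similarity_organize.py | final_values
-- ===== SOURCE A (Python) =====
-- def final_values(S_values, isMax):
--     ''' helper function to assign the max of the weights assigned to each term '''
--     unique_terms_s_values = []
--     for path in S_values:
--         for term in path:
--             unique_terms_s_values.append(term) # collect all (terms, weight) among paths
--     unique_terms_s_values = sorted(unique_terms_s_values, key=lambda x: x[0]) # sorted based on term
--     _s_values = {}
--     for y, x in unique_terms_s_values:
--         if y in _s_values:
--             _s_values[y].append((y, x)) # if term in dictionary, append (terms, weight)
--         else:
--             _s_values[y] = [(y, x)] # if term not in dictionary, key = term, values = (terms, weight)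
--     final_s_values = []
--     if(isMax == 'max'):
--         for node in _s_values:
--             final_s_values.append(max(_s_values[node])) # append (term, max weight of this term) to final_s_values
--     elif (isMax == 'min'):
--         for node in _s_values:
--             final_s_values.append(min(_s_values[node]))
--     return final_s_values
-- ===== SOURCE B (Python) =====
-- def final_values(S_values, isMax):
--     ''' one-pass dict aggregation of max/min weight per term, then sort the unique terms '''
--     if isMax == 'max' or isMax == 'min':
--         agg = {}
--         for path in S_values:
--             for t, w in path:
--                 if t in agg:
--                     w = max(agg[t], w) if isMax == 'max' else min(agg[t], w)
--                 agg[t] = w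
--         return [(t, agg[t]) for t in sorted(agg)]
--     return []
-- ===== Notes on version B (the rewrite author's own statement) =====
-- stated objective: faster
-- what changed: Instead of sorting the whole flattened pair list and grouping per-term pair lists in a dict whose per-key lists are then reduced by tuple max/min, B aggregates a single running max/min per term in one dict pass over the nested lists and then sorts only the unique terms.
import Mathlib
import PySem

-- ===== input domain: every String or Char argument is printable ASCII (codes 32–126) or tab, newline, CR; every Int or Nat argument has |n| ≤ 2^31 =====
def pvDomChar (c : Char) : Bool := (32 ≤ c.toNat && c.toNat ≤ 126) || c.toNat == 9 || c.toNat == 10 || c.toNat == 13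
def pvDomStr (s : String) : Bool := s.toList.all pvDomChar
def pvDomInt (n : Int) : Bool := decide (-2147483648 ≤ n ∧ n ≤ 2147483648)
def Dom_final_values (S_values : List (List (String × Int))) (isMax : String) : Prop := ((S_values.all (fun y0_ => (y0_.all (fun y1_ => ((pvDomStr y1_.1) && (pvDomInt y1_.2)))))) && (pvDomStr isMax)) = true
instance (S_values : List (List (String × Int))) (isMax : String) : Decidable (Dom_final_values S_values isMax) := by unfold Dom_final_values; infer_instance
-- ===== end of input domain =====

-- B replaces A's sort-everything-then-group-then-reduce by a one-pass dict of the running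
-- max/min weight per term followed by a sort of the unique terms only.

-- ===== PORT A =====
-- Python's max()/min() of each per-term group compares (term, weight) tuples lexicographically;
-- ported as PySem.List.max2?/min2?.  The groups stored in the dict are nonempty by construction,
-- so the `.getD ("", 0)` default (Python max/min would raise on []) is never taken.
def final_values (S_values : List (List (String × Int))) (isMax : String) : List (String × Int) :=
  let unique_terms_s_values : List (String × Int) :=
    S_values.foldl (fun acc path => path.foldl (fun acc term => acc ++ [term]) acc) []
  let sorted_terms := PySem.List.sorted unique_terms_s_values (fun x => x.1) false
  let _s_values : PySem.Dict String (List (String × Int)) :=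
    sorted_terms.foldl (fun d p =>
      if d.contains p.1 then d.modify p.1 [] (fun l => l ++ [(p.1, p.2)])
      else d.insert p.1 [(p.1, p.2)]) PySem.Dict.empty
  if isMax == "max" then
    _s_values.keys.foldl (fun acc node =>
      acc ++ [(PySem.List.max2? (_s_values.getD node []) (fun q => q.1) (fun q => q.2)).getD ("", 0)]) []
  else if isMax == "min" then
    _s_values.keys.foldl (fun acc node =>
      acc ++ [(PySem.List.min2? (_s_values.getD node []) (fun q => q.1) (fun q => q.2)).getD ("", 0)]) []
  else []

-- ===== PORT B =====
def final_values_alt (S_values : List (List (String × Int))) (isMax : String) : List (String × Int) :=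
  if isMax == "max" || isMax == "min" then
    let agg : PySem.Dict String Int :=
      S_values.foldl (fun agg path =>
        path.foldl (fun agg p =>
          agg.insert p.1
            (if agg.contains p.1 then
              (if isMax == "max" then max (agg.getD p.1 0) p.2 else min (agg.getD p.1 0) p.2)
             else p.2)) agg) PySem.Dict.empty
    (PySem.List.sorted agg.keys (fun t => t) false).map (fun t => (t, agg.getD t 0))
  else []

-- ===== PRECONDITION & SPEC =====
def Spec_final_values (S_values : List (List (String × Int))) (isMax : String) (out : List (String × Int)) : Prop := out = final_values_alt S_values isMax
instance (S_values : List (List (String × Int))) (isMax : String) (out : List (String × Int)) : Decidable (Spec_final_values S_values isMax out) := by unfold Spec_final_values; infer_instance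

-- ===== CLAIM (what is proved, stated in full; the proofs are below) =====
def Claim_equal_final_values : Prop := ∀ (S_values : List (List (String × Int))) (isMax : String), Dom_final_values S_values isMax → Spec_final_values S_values isMax (final_values S_values isMax)

-- ===== LEMMAS AND PROOFS =====

-- the option-valued running fold "none = not seen yet, some v = best so far" used on both sides
def pvOStep (op : Int → Int → Int) : Option Int → Int → Option Int :=
  fun o w => some (match o with | none => w | some v => op v w)

def pvWFold (op : Int → Int → Int) (ws : List Int) : Option Int :=
  ws.foldl (pvOStep op) none

theorem pvOStep_rcomm (op : Int → Int → Int)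
    (hc : ∀ a b, op a b = op b a) (ha : ∀ a b c, op (op a b) c = op a (op b c)) :
    ∀ (o : Option Int) (w1 w2 : Int), pvOStep op (pvOStep op o w1) w2 = pvOStep op (pvOStep op o w2) w1 := by
  intro o w1 w2
  cases o <;> simp [pvOStep, ha, hc w1 w2]

theorem pvWFold_perm (op : Int → Int → Int)
    (hc : ∀ a b, op a b = op b a) (ha : ∀ a b c, op (op a b) c = op a (op b c))
    {ws₁ ws₂ : List Int} (h : ws₁.Perm ws₂) : pvWFold op ws₁ = pvWFold op ws₂ :=
  @List.Perm.foldl_eq _ _ (pvOStep op) _ _ ⟨pvOStep_rcomm op hc ha⟩ h none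

theorem pvFoldSome (op : Int → Int → Int) (t : List Int) (w : Int) :
    t.foldl (pvOStep op) (some w) = some (t.foldl op w) := by
  induction t generalizing w with
  | nil => rfl
  | cons x t ih => simp [List.foldl, pvOStep, ih]

theorem pvWFold_cons (op : Int → Int → Int) (w : Int) (t : List Int) :
    pvWFold op (w :: t) = some (t.foldl op w) := by
  simp [pvWFold, List.foldl, pvOStep, pvFoldSome]

-- B's aggregation loop: the dict entry at k is the running fold of the weights filed under k
theorem pvBAgg (op : Int → Int → Int) (l : List (String × Int)) (d : PySem.Dict String Int) (k : String) :
    (l.foldl (fun d p =>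
        d.insert p.1 (if d.contains p.1 then op (d.getD p.1 0) p.2 else p.2)) d).get? k
      = ((l.filter (fun p => p.1 == k)).map (fun p => p.2)).foldl (pvOStep op) (d.get? k) := by
  induction l generalizing d with
  | nil => rfl
  | cons p t ih =>
    simp only [List.foldl_cons, ih, List.filter_cons]
    by_cases hpk : p.1 = k
    · subst hpk
      simp only [BEq.rfl, if_pos, List.map_cons, List.foldl_cons]
      congr 1
      rw [PySem.Dict.get?_insert_self, PySem.Dict.contains_eq_isSome_get?]
      cases hd : d.get? p.1 with
      | none => simp [pvOStep]
      | some v => simp [pvOStep, PySem.Dict.getD_of_get?_eq_some _ _ hd]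
    · have : (p.1 == k) = false := by simp [hpk]
      simp only [this]
      congr 1
      exact PySem.Dict.get?_insert_of_ne _ _ (Ne.symm hpk)

-- Set.ofList keeps a sublist (the first occurrences)
theorem pvFoldlAdd_sublist (l : List String) : ∀ s : List String, (l.foldl PySem.Set.add s).Sublist (s ++ l) := by
  induction l with
  | nil => intro s; simp
  | cons x t ih =>
    intro s
    simp only [List.foldl_cons, PySem.Set.add]
    by_cases hx : PySem.Set.contains s x = true
    · rw [if_pos hx]
      exact (ih s).trans ((List.sublist_cons_self x t).append_left s)
    · rw [if_neg hx]
      simpa [List.append_assoc] using ih (s ++ [x])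

theorem pvOfList_sublist (l : List String) : (PySem.Set.ofList l).Sublist l := by
  rw [PySem.Set.ofList_eq_foldl]
  simpa using pvFoldlAdd_sublist l []

-- A's group reducers on an all-same-key group compute the running max / min of the weights
theorem pvMax2_group (k : String) (g : List (String × Int)) : ∀ (w : Int), (∀ p ∈ g, p.1 = k) →
    PySem.List.max2? ((k, w) :: g) (fun q => q.1) (fun q => q.2)
      = some (k, (g.map (fun p => p.2)).foldl max w) := by
  induction g with
  | nil => intro w _; rfl
  | cons p t ih =>
    obtain ⟨p1, p2⟩ := p
    intro w h
    have hp : p1 = k := h (p1, p2) (by simp)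
    subst hp
    have hmax : max w p2 = if w < p2 then p2 else w := by split_ifs <;> omega
    have hif : (if (decide (p1 < p1) || !decide (p1 < p1) && decide (w < p2)) = true
        then some (p1, p2) else some (p1, w)) = some (p1, max w p2) := by
      simp only [lt_irrefl, decide_false, Bool.false_or, Bool.not_false, Bool.true_and,
        decide_eq_true_eq, hmax]
      split_ifs <;> rfl
    have step : PySem.List.max2? ((p1, w) :: (p1, p2) :: t) (fun q => q.1) (fun q => q.2)
        = PySem.List.max2? ((p1, max w p2) :: t) (fun q => q.1) (fun q => q.2) := by
      simp only [PySem.List.max2?, List.foldl_cons]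
      rw [hif]
    rw [step, ih _ (fun q hq => h q (List.mem_cons_of_mem _ hq))]
    simp

theorem pvMin2_group (k : String) (g : List (String × Int)) : ∀ (w : Int), (∀ p ∈ g, p.1 = k) →
    PySem.List.min2? ((k, w) :: g) (fun q => q.1) (fun q => q.2)
      = some (k, (g.map (fun p => p.2)).foldl min w) := by
  induction g with
  | nil => intro w _; rfl
  | cons p t ih =>
    obtain ⟨p1, p2⟩ := p
    intro w h
    have hp : p1 = k := h (p1, p2) (by simp)
    subst hp
    have hmin : min w p2 = if p2 < w then p2 else w := by split_ifs <;> omega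
    have hif : (if (decide (p1 < p1) || !decide (p1 < p1) && decide (p2 < w)) = true
        then some (p1, p2) else some (p1, w)) = some (p1, min w p2) := by
      simp only [lt_irrefl, decide_false, Bool.false_or, Bool.not_false, Bool.true_and,
        decide_eq_true_eq, hmin]
      split_ifs <;> rfl
    have step : PySem.List.min2? ((p1, w) :: (p1, p2) :: t) (fun q => q.1) (fun q => q.2)
        = PySem.List.min2? ((p1, min w p2) :: t) (fun q => q.1) (fun q => q.2) := by
      simp only [PySem.List.min2?, List.foldl_cons]
      rw [hif]
    rw [step, ih _ (fun q hq => h q (List.mem_cons_of_mem _ hq))]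
    simp

-- A's grouping loop: the dict entry at k collects, in order, the pairs filed under k
theorem pvAGroup (l : List (String × Int)) : ∀ (d : PySem.Dict String (List (String × Int))) (k : String),
    (l.foldl (fun d p =>
        if d.contains p.1 then d.modify p.1 [] (fun x => x ++ [(p.1, p.2)])
        else d.insert p.1 [(p.1, p.2)]) d).getD k []
      = d.getD k [] ++ l.filter (fun p => p.1 == k) := by
  induction l with
  | nil => intro d k; simp
  | cons p t ih =>
    intro d k
    have hstep : (if d.contains p.1 then d.modify p.1 [] (fun x => x ++ [(p.1, p.2)])
        else d.insert p.1 [(p.1, p.2)])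
        = d.insert p.1 (d.getD p.1 [] ++ [(p.1, p.2)]) := by
      by_cases hc : d.contains p.1
      · simp [hc, PySem.Dict.modify]
      · have hc' : d.contains p.1 = false := by simpa using hc
        simp [hc', PySem.Dict.getD_of_not_contains _ _ hc']
    simp only [List.foldl_cons, hstep, ih, List.filter_cons]
    by_cases hpk : p.1 = k
    · subst hpk
      simp
    · have hne : (p.1 == k) = false := by simp [hpk]
      have hne' : ¬ (k = p.1) := fun h => hpk h.symm
      simp [hne, hne', PySem.Dict.getD_insert]

-- A's sorted-then-deduped key list is the sorted dedup of the key multiset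
theorem pvKeys_eq (flat : List (String × Int)) :
    PySem.List.sorted (PySem.Set.ofList (flat.map (fun p => p.1))) (fun t => t) false
      = PySem.Set.ofList ((PySem.List.sorted flat (fun p => p.1) false).map (fun p => p.1)) := by
  have hpermL : ((PySem.List.sorted flat (fun p => p.1) false).map (fun p => p.1)).Perm
      (flat.map (fun p => p.1)) := (PySem.List.sorted_perm flat (fun p => p.1) false).map _
  apply PySem.List.sorted_eq_of_perm_of_pairwise_lt
  · rw [List.perm_ext_iff_of_nodup (PySem.Set.nodup_ofList _) (PySem.Set.nodup_ofList _)]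
    intro a
    rw [PySem.Set.mem_ofList, PySem.Set.mem_ofList]
    exact hpermL.mem_iff
  · have hle : List.Pairwise (fun a b => a ≤ b)
        ((PySem.List.sorted flat (fun p => p.1) false).map (fun p => p.1)) := by
      rw [List.pairwise_map]
      exact PySem.List.sorted_pairwise flat (fun p => p.1)
    have hsub := pvOfList_sublist ((PySem.List.sorted flat (fun p => p.1) false).map (fun p => p.1))
    have hle' := List.Pairwise.sublist hsub hle
    have hnd : List.Pairwise (fun a b : String => a ≠ b)
        (PySem.Set.ofList ((PySem.List.sorted flat (fun p => p.1) false).map (fun p => p.1))) :=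
      PySem.Set.nodup_ofList _
    exact (hle'.and hnd).imp (fun h => lt_of_le_of_ne h.1 h.2)

-- the common shape of both programs: either nontrivial branch, parametric in the reducer
theorem pvBranchEq (flat : List (String × Int)) (op : Int → Int → Int)
    (red : List (String × Int) → Option (String × Int))
    (hred : ∀ (k : String) (w : Int) (g : List (String × Int)), (∀ p ∈ g, p.1 = k) →
      red ((k, w) :: g) = some (k, (g.map (fun p => p.2)).foldl op w))
    (hc : ∀ a b, op a b = op b a) (ha : ∀ a b c, op (op a b) c = op a (op b c)) :
    (((PySem.List.sorted flat (fun p => p.1) false).foldl (fun d p =>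
        if d.contains p.1 then d.modify p.1 [] (fun l => l ++ [(p.1, p.2)])
        else d.insert p.1 [(p.1, p.2)]) PySem.Dict.empty).keys).foldl (fun acc node =>
          acc ++ [(red (((PySem.List.sorted flat (fun p => p.1) false).foldl (fun d p =>
            if d.contains p.1 then d.modify p.1 [] (fun l => l ++ [(p.1, p.2)])
            else d.insert p.1 [(p.1, p.2)]) PySem.Dict.empty).getD node [])).getD ("", 0)]) []
      = (PySem.List.sorted ((flat.foldl (fun d p =>
          d.insert p.1 (if d.contains p.1 then op (d.getD p.1 0) p.2 else p.2))
            PySem.Dict.empty).keys) (fun t => t) false).map (fun t =>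
              (t, (flat.foldl (fun d p =>
                d.insert p.1 (if d.contains p.1 then op (d.getD p.1 0) p.2 else p.2))
                  PySem.Dict.empty).getD t 0)) := by
  have hstep : ∀ (d : PySem.Dict String (List (String × Int))) (p : String × Int),
      (if d.contains p.1 then d.modify p.1 [] (fun l => l ++ [(p.1, p.2)])
        else d.insert p.1 [(p.1, p.2)])
      = d.insert p.1 (d.getD p.1 [] ++ [(p.1, p.2)]) := by
    intro d p
    by_cases hcon : d.contains p.1
    · simp [hcon, PySem.Dict.modify]
    · have hc' : d.contains p.1 = false := by simpa using hcon
      simp [hc', PySem.Dict.getD_of_not_contains _ _ hc']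
  -- key lists
  have hkeysA : (((PySem.List.sorted flat (fun p => p.1) false).foldl (fun d p =>
      if d.contains p.1 then d.modify p.1 [] (fun l => l ++ [(p.1, p.2)])
      else d.insert p.1 [(p.1, p.2)]) PySem.Dict.empty).keys)
      = PySem.Set.ofList ((PySem.List.sorted flat (fun p => p.1) false).map (fun p => p.1)) := by
    simp only [hstep]
    rw [PySem.Dict.keys_foldl_insert_key _ (fun (p : String × Int) => p.1)
      (fun (d : PySem.Dict String (List (String × Int))) (p : String × Int) =>
        d.getD p.1 [] ++ [(p.1, p.2)]), PySem.Dict.keys_empty, PySem.Set.ofList_eq_foldl]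
    rfl
  have hkeysB : ((flat.foldl (fun d p =>
      d.insert p.1 (if d.contains p.1 then op (d.getD p.1 0) p.2 else p.2))
        PySem.Dict.empty).keys)
      = PySem.Set.ofList (flat.map (fun p => p.1)) := by
    rw [PySem.Dict.keys_foldl_insert_key _ (fun (p : String × Int) => p.1)
      (fun (d : PySem.Dict String Int) (p : String × Int) =>
        if d.contains p.1 then op (d.getD p.1 0) p.2 else p.2), PySem.Dict.keys_empty,
      PySem.Set.ofList_eq_foldl]
    rfl
  rw [PySem.List.foldl_append_singleton_eq_map, List.nil_append, hkeysA, hkeysB, pvKeys_eq]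
  apply List.map_congr_left
  intro k hk
  -- k occurs in the sorted flat list
  have hkmem : k ∈ (PySem.List.sorted flat (fun p => p.1) false).map (fun p => p.1) :=
    (PySem.Set.mem_ofList _ k).1 hk
  obtain ⟨q0, hq0mem, hq0⟩ := List.mem_map.1 hkmem
  -- the group is nonempty and all its members carry key k
  have hgmem : q0 ∈ (PySem.List.sorted flat (fun p => p.1) false).filter (fun p => p.1 == k) :=
    List.mem_filter.2 ⟨hq0mem, by simp [hq0]⟩
  have hall : ∀ p ∈ (PySem.List.sorted flat (fun p => p.1) false).filter (fun p => p.1 == k),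
      p.1 = k := by
    intro p hp
    simpa using (List.mem_filter.1 hp).2
  rw [pvAGroup _ _ k, PySem.Dict.getD_empty, List.nil_append]
  cases hg : (PySem.List.sorted flat (fun p => p.1) false).filter (fun p => p.1 == k) with
  | nil => exact absurd (hg ▸ hgmem) (List.not_mem_nil)
  | cons q t =>
    have hallg := hg ▸ hall
    have hq1 : q.1 = k := hallg q (List.mem_cons_self)
    have hqeta : q = (k, q.2) := by
      cases q; simp_all
    have ht : ∀ p ∈ t, p.1 = k := fun p hp => hallg p (List.mem_cons_of_mem _ hp)
    rw [hqeta, hred k q.2 t ht, Option.getD_some]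
    -- B's dict value at k
    have hBget : ((flat.foldl (fun d p =>
        d.insert p.1 (if d.contains p.1 then op (d.getD p.1 0) p.2 else p.2))
          PySem.Dict.empty).get? k)
        = pvWFold op ((flat.filter (fun p => p.1 == k)).map (fun p => p.2)) := by
      rw [pvBAgg op flat PySem.Dict.empty k, PySem.Dict.get?_empty]
      rfl
    have hperm : (((q :: t) : List (String × Int)).map (fun p => p.2)).Perm
        ((flat.filter (fun p => p.1 == k)).map (fun p => p.2)) := by
      rw [← hg]
      exact (((PySem.List.sorted_perm flat (fun p => p.1) false).filter _).map _)
    have hval : pvWFold op ((flat.filter (fun p => p.1 == k)).map (fun p => p.2))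
        = some ((t.map (fun p => p.2)).foldl op q.2) := by
      rw [← pvWFold_perm op hc ha hperm]
      simp only [List.map_cons]
      exact pvWFold_cons op q.2 (t.map (fun p => p.2))
    have : ((flat.foldl (fun d p =>
        d.insert p.1 (if d.contains p.1 then op (d.getD p.1 0) p.2 else p.2))
          PySem.Dict.empty).getD k 0) = (t.map (fun p => p.2)).foldl op q.2 :=
      PySem.Dict.getD_of_get?_eq_some _ _ (hBget.trans hval)
    rw [this]

theorem pvMain (S_values : List (List (String × Int))) (isMax : String) :
    final_values S_values isMax = final_values_alt S_values isMax := by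
  have hflatA : S_values.foldl (fun acc path => path.foldl (fun acc term => acc ++ [term]) acc)
      ([] : List (String × Int)) = S_values.flatten := by
    simp only [PySem.List.foldl_append_singleton_eq_self]
    rw [PySem.List.foldl_append_eq_flatten, List.nil_append]
  have hflatB : ∀ (f : PySem.Dict String Int → (String × Int) → PySem.Dict String Int),
      S_values.foldl (fun agg path => path.foldl f agg) PySem.Dict.empty
        = S_values.flatten.foldl f PySem.Dict.empty := fun f => (List.foldl_flatten).symm
  by_cases hmax : isMax == "max"
  · simp only [final_values, final_values_alt, hmax, Bool.true_or, if_true, hflatA, hflatB]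
    exact pvBranchEq S_values.flatten max
      (fun l => PySem.List.max2? l (fun q => q.1) (fun q => q.2))
      (fun k w g h => pvMax2_group k g w h)
      (fun a b => max_comm a b) (fun a b c => max_assoc a b c)
  · by_cases hmin : isMax == "min"
    · simp only [final_values, final_values_alt, hmax, hmin, Bool.false_or, if_true,
        Bool.false_eq_true, if_false, hflatA, hflatB]
      exact pvBranchEq S_values.flatten min
        (fun l => PySem.List.min2? l (fun q => q.1) (fun q => q.2))
        (fun k w g h => pvMin2_group k g w h)
        (fun a b => min_comm a b) (fun a b c => min_assoc a b c)
    · simp only [final_values, final_values_alt, hmax, hmin, Bool.false_or,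
        Bool.false_eq_true, if_false]

-- ===== VERDICT (by name: the statement is the Claim_ definition above) =====
theorem final_values_spec : Claim_equal_final_values := by
  intro S isMax _
  exact (pvMain S isMax).symm ▸ rfl
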